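-- pv_equiv track=rewrite | github.com/javihernant/aoc2023 | day14a.py | count_rocks
-- ===== SOURCE A (Python) =====
-- def count_rocks(data):
--     lines = data.splitlines()
--     h = len(lines)
--     w = len(lines[0])
--     count = [0 for _ in range(h)]
--     last = [0 for _ in range(w)]
--     for i,line in enumerate(lines):
--         for j in range(w):
--             if line[j] == 'O':
--                 count[last[j]] += 1
--                 last[j]+=1
--             elif line[j] == '#':
--                 last[j] = i+1
--     return count
-- ===== SOURCE B (Python) =====
-- def count_rocks(data):
--     lines = data.splitlines()
--     h = len(lines)
--     w = len(lines[0])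
--     count = [0] * h
--     for j in range(w):
--         col = [line[j] for line in lines]
--         s = 0
--         n = 0
--         for k, c in enumerate(col):
--             if c == '#':
--                 for r in range(s, s + n):
--                     count[r] += 1
--                 s = k + 1
--                 n = 0
--             elif c == 'O':
--                 n += 1
--         for r in range(s, s + n):
--             count[r] += 1
--     return count
-- ===== Notes on version B (the rewrite author's own statement) =====
-- stated objective: alternative
-- what changed: B transposes the scan to column-major and, per column, accumulates each '#'-delimited run's rock count n and then adds 1 to the contiguous row range [s, s+n) in one distribution step, instead of A's row-major sweep maintaining a per-column landing-pointer array and incrementing one cell per rock.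
import Mathlib
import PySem

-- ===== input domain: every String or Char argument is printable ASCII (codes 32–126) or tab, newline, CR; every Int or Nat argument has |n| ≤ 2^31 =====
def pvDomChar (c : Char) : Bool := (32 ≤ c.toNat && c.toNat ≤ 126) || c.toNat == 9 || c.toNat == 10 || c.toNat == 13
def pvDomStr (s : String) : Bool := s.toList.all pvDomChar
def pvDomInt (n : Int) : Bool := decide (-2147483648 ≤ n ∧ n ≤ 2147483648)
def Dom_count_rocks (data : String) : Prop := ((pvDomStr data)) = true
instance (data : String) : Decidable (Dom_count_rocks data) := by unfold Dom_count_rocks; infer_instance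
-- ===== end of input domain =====

-- B re-decomposes A's row-major landing-pointer sweep as a column-major pass that distributes
-- each '#'-delimited run's rocks to a contiguous row range at once (objective: alternative,
-- same asymptotic cost).

-- shared literal helper: the Python statement `count[r] += 1`
def pvIncr (c : List Int) (r : Nat) : List Int := c.set r (c.getD r 0 + 1)

-- ===== PORT A =====
def count_rocks (data : String) : List Int :=
  let lines := PySem.Str.splitlines data
  let h := lines.length
  -- len(lines[0]); IndexError on empty input is excluded by Pre_
  let w := ((lines.getD 0 "").toList).length
  -- for i,line in enumerate(lines): for j in range(w): …   (zipIdx pairs are (line, i))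
  ((lines.zipIdx.foldl (fun (st : List Int × List Nat) (p : String × Nat) =>
      (List.range w).foldl (fun (st : List Int × List Nat) (j : Nat) =>
        -- line[j]; IndexError on a line shorter than w is excluded by Pre_ (default never read inside Pre_)
        let ch := p.1.toList.getD j ' '
        if ch = 'O' then (pvIncr st.1 (st.2.getD j 0), st.2.set j (st.2.getD j 0 + 1))
        else if ch = '#' then (st.1, st.2.set j (p.2 + 1))
        else st) st)
    (List.replicate h 0, List.replicate w 0))).1

-- ===== PORT B =====
-- the Python loop `for r in range(s, s+n): count[r] += 1`
def pvAddRange (c : List Int) (s n : Nat) : List Int := (List.range' s n).foldl pvIncr c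

def count_rocks_alt (data : String) : List Int :=
  let lines := PySem.Str.splitlines data
  let h := lines.length
  -- len(lines[0]); IndexError on empty input is excluded by Pre_
  let w := ((lines.getD 0 "").toList).length
  (List.range w).foldl (fun cnt j =>
    -- col = [line[j] for line in lines]; IndexError on short lines excluded by Pre_
    let col := lines.map (fun line => line.toList.getD j ' ')
    -- for k, c in enumerate(col): …   (zipIdx pairs are (char, k); state = (count, s, n))
    let r := col.zipIdx.foldl (fun (acc : List Int × Nat × Nat) (p : Char × Nat) =>
        if p.1 = '#' then (pvAddRange acc.1 acc.2.1 acc.2.2, p.2 + 1, 0)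
        else if p.1 = 'O' then (acc.1, acc.2.1, acc.2.2 + 1)
        else acc) (cnt, 0, 0)
    pvAddRange r.1 r.2.1 r.2.2) (List.replicate h 0)

-- ===== PRECONDITION & SPEC =====
-- Pre_ excludes exactly the inputs where the Python raises IndexError: no lines at all
-- (lines[0]), or a line shorter than the first line (line[j] for j < w).
def Pre_count_rocks (data : String) : Prop :=
  PySem.Str.splitlines data ≠ [] ∧
  ∀ l ∈ PySem.Str.splitlines data,
    (((PySem.Str.splitlines data).getD 0 "").toList).length ≤ l.toList.length
instance (data : String) : Decidable (Pre_count_rocks data) := by unfold Pre_count_rocks; infer_instance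

def pvWitness_count_rocks : String := "O#.\n.OO\nO.."

def Spec_count_rocks (data : String) (out : List Int) : Prop := out = count_rocks_alt data
instance (data : String) (out : List Int) : Decidable (Spec_count_rocks data out) := by unfold Spec_count_rocks; infer_instance

-- ===== CLAIM (what is proved, stated in full; the proofs are below) =====
def Claim_equal_count_rocks : Prop := ∀ (data : String), Dom_count_rocks data → Pre_count_rocks data → Spec_count_rocks data (count_rocks data)

-- ===== LEMMAS AND PROOFS =====

-- per-column reference simulation: entries are (char, row index); `l` is the next landing row
def pvAsim : List (Char × Nat) → Nat → List Int → List Int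
  | [], _, c => c
  | p :: tl, l, c =>
      if p.1 = 'O' then pvAsim tl (l + 1) (pvIncr c l)
      else if p.1 = '#' then pvAsim tl (p.2 + 1) c
      else pvAsim tl l c
theorem pvIncr_comm (c : List Int) (a b : Nat) :
    pvIncr (pvIncr c a) b = pvIncr (pvIncr c b) a := by
  by_cases hab : a = b
  · subst hab; rfl
  · unfold pvIncr
    rw [List.getD_eq_getElem?_getD, List.getD_eq_getElem?_getD,
        List.getD_eq_getElem?_getD, List.getD_eq_getElem?_getD,
        List.getElem?_set, List.getElem?_set]
    simp only [hab, Ne.symm hab, if_false, List.set_comm _ _ hab]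
theorem pvAsim_incr (tl : List (Char × Nat)) :
    ∀ l c r, pvAsim tl l (pvIncr c r) = pvIncr (pvAsim tl l c) r := by
  induction tl with
  | nil => intro l c r; rfl
  | cons p tl ih =>
      intro l c r
      simp only [pvAsim]
      split_ifs <;> (rw [← ih]; try rw [pvIncr_comm])
theorem pvAddRange_succ (c : List Int) (s n : Nat) :
    pvAddRange c s (n + 1) = pvIncr (pvAddRange c s n) (s + n) := by
  unfold pvAddRange
  rw [List.range'_concat, List.foldl_append]
  simp
theorem pvB_col (ps : List (Char × Nat)) :
    ∀ (c : List Int) (s n : Nat),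
      (let r := ps.foldl (fun (acc : List Int × Nat × Nat) (p : Char × Nat) =>
          if p.1 = '#' then (pvAddRange acc.1 acc.2.1 acc.2.2, p.2 + 1, 0)
          else if p.1 = 'O' then (acc.1, acc.2.1, acc.2.2 + 1)
          else acc) (c, s, n)
       pvAddRange r.1 r.2.1 r.2.2) = pvAsim ps (s + n) (pvAddRange c s n) := by
  induction ps with
  | nil => intro c s n; rfl
  | cons p tl ih =>
      intro c s n
      simp only [List.foldl_cons, pvAsim]
      by_cases h1 : p.1 = '#'
      · by_cases h2 : p.1 = 'O'
        · rw [h1] at h2; exact absurd h2 (by decide)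
        · simp only [h1, if_true]
          have := ih (pvAddRange c s n) (p.2 + 1) 0
          simpa using this
      · by_cases h2 : p.1 = 'O'
        · simp only [h2, if_neg (show ¬('O':Char) = '#' by decide)]
          simpa [pvAddRange_succ] using ih c s (n + 1)
        · simp only [h1, h2, if_false]
          exact ih c s n

theorem pvFoldl_comm_fn {α ι : Type} (R : List ι) (g : ι → α → α) (φ : α → α)
    (h : ∀ j ∈ R, ∀ c, g j (φ c) = φ (g j c)) :
    ∀ c, R.foldl (fun c j => g j c) (φ c) = φ (R.foldl (fun c j => g j c) c) := by
  induction R with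
  | nil => intro c; rfl
  | cons j R ih =>
      intro c
      simp only [List.foldl_cons]
      rw [h j (List.mem_cons_self) c]
      exact ih (fun j' hj' c => h j' (List.mem_cons_of_mem _ hj') c) (g j c)
theorem pvFoldl_interchange {α ι : Type} (R : List ι) (f g : ι → α → α)
    (comm : ∀ j j' c, g j (f j' c) = f j' (g j c)) :
    ∀ c, R.foldl (fun c j => f j (g j c)) c
      = R.foldl (fun c j => f j c) (R.foldl (fun c j => g j c) c) := by
  induction R with
  | nil => intro c; rfl
  | cons j R ih =>
      intro c
      simp only [List.foldl_cons]
      rw [ih (f j (g j c))]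
      congr 1
      exact pvFoldl_comm_fn R g (f j) (fun j' _ c => comm j' j c) (g j c)
theorem pvRow_split (i : Nat) (ch : Nat → Char) :
    ∀ (R : List Nat), R.Nodup → ∀ (cnt : List Int) (last : List Nat), (∀ j ∈ R, j < last.length) →
      (R.foldl (fun (st : List Int × List Nat) (j : Nat) =>
        if ch j = 'O' then (pvIncr st.1 (st.2.getD j 0), st.2.set j (st.2.getD j 0 + 1))
        else if ch j = '#' then (st.1, st.2.set j (i + 1))
        else st) (cnt, last)).1
        = R.foldl (fun c j => if ch j = 'O' then pvIncr c (last.getD j 0) else c) cnt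
      ∧ (R.foldl (fun (st : List Int × List Nat) (j : Nat) =>
        if ch j = 'O' then (pvIncr st.1 (st.2.getD j 0), st.2.set j (st.2.getD j 0 + 1))
        else if ch j = '#' then (st.1, st.2.set j (i + 1))
        else st) (cnt, last)).2.length = last.length
      ∧ ∀ j, (R.foldl (fun (st : List Int × List Nat) (j : Nat) =>
        if ch j = 'O' then (pvIncr st.1 (st.2.getD j 0), st.2.set j (st.2.getD j 0 + 1))
        else if ch j = '#' then (st.1, st.2.set j (i + 1))
        else st) (cnt, last)).2.getD j 0
          = if j ∈ R then (if ch j = 'O' then last.getD j 0 + 1 else if ch j = '#' then i + 1 else last.getD j 0)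
            else last.getD j 0 := by
  intro R
  induction R with
  | nil =>
      intro _ cnt last _
      refine ⟨rfl, rfl, ?_⟩
      intro j; simp
  | cons j0 R ih =>
      intro hnd cnt last hlt
      have hj0R : j0 ∉ R := (List.nodup_cons.mp hnd).1
      have hndR : R.Nodup := (List.nodup_cons.mp hnd).2
      have hj0 : j0 < last.length := hlt j0 (List.mem_cons_self)
      -- the state after the first cell
      set cnt1 : List Int := if ch j0 = 'O' then pvIncr cnt (last.getD j0 0) else cnt with hcnt1
      set last1 : List Nat :=
        if ch j0 = 'O' then last.set j0 (last.getD j0 0 + 1)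
        else if ch j0 = '#' then last.set j0 (i + 1) else last with hlast1
      have hstep : (fun (st : List Int × List Nat) (j : Nat) =>
        if ch j = 'O' then (pvIncr st.1 (st.2.getD j 0), st.2.set j (st.2.getD j 0 + 1))
        else if ch j = '#' then (st.1, st.2.set j (i + 1))
        else st) (cnt, last) j0 = (cnt1, last1) := by
        simp only [hcnt1, hlast1]
        split_ifs <;> rfl
      have hlen1 : last1.length = last.length := by
        simp only [hlast1]; split_ifs <;> simp
      have hgd : ∀ j, j ≠ j0 → last1.getD j 0 = last.getD j 0 := by
        intro j hj
        simp only [hlast1, List.getD_eq_getElem?_getD]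
        split_ifs <;> simp [Ne.symm hj]
      have hgd0 : last1.getD j0 0
          = (if ch j0 = 'O' then last.getD j0 0 + 1 else if ch j0 = '#' then i + 1 else last.getD j0 0) := by
        simp only [hlast1, List.getD_eq_getElem?_getD]
        split_ifs <;> simp [hj0]
      have hlt1 : ∀ j ∈ R, j < last1.length := fun j hj => hlen1 ▸ hlt j (List.mem_cons_of_mem _ hj)
      obtain ⟨ih1, ih2, ih3⟩ := ih hndR cnt1 last1 hlt1
      refine ⟨?_, ?_, ?_⟩
      · simp only [List.foldl_cons, hstep, ih1]
        apply PySem.List.foldl_congr_mem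
        intro acc x hx
        have hxj0 : x ≠ j0 := fun h => hj0R (h ▸ hx)
        rw [hgd x hxj0]
      · simp only [List.foldl_cons, hstep, ih2, hlen1]
      · intro j
        simp only [List.foldl_cons, hstep, ih3]
        by_cases hjR : j ∈ R
        · have hjj0 : j ≠ j0 := fun h => hj0R (h ▸ hjR)
          have hg := hgd j hjj0
          simp only [List.getD_eq_getElem?_getD] at hg
          simp [hjR, hg, hjj0]
        · by_cases hjj0 : j = j0
          · subst hjj0
            have hg0 := hgd0
            simp only [List.getD_eq_getElem?_getD] at hg0
            simp [hjR, hg0]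
          · have hg := hgd j hjj0
            simp only [List.getD_eq_getElem?_getD] at hg
            simp [hjR, hjj0, hg, List.mem_cons]

theorem pvFoldl_id {α ι : Type} (R : List ι) (c : α) : R.foldl (fun c _ => c) c = c := by
  induction R generalizing c with
  | nil => rfl
  | cons _ R ih => exact ih c

theorem pvAsim_cons (a : Char) (k : Nat) (tl : List (Char × Nat)) (l : Nat) (c : List Int) :
    pvAsim ((a, k) :: tl) l c
      = pvAsim tl (if a = 'O' then l + 1 else if a = '#' then k + 1 else l)
          (if a = 'O' then pvIncr c l else c) := by
  simp only [pvAsim]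
  split_ifs <;> rfl

-- MAIN: A's row-major sweep equals the column-major composition of column simulations
theorem pvMain (w : Nat) :
    ∀ (ls : List String) (k : Nat) (cnt : List Int) (last : List Nat), last.length = w →
      ((ls.zipIdx k).foldl (fun (st : List Int × List Nat) (p : String × Nat) =>
        (List.range w).foldl (fun (st : List Int × List Nat) (j : Nat) =>
          let ch := p.1.toList.getD j ' '
          if ch = 'O' then (pvIncr st.1 (st.2.getD j 0), st.2.set j (st.2.getD j 0 + 1))
          else if ch = '#' then (st.1, st.2.set j (p.2 + 1))
          else st) st) (cnt, last)).1
      = (List.range w).foldl (fun c j =>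
          pvAsim ((ls.map (fun line => line.toList.getD j ' ')).zipIdx k) (last.getD j 0) c) cnt := by
  intro ls
  induction ls with
  | nil =>
      intro k cnt last _
      simp only [List.zipIdx_nil, List.foldl_nil, List.map_nil, pvAsim]
      exact (pvFoldl_id _ cnt).symm
  | cons line rest ih =>
      intro k cnt last hlast
      rw [List.zipIdx_cons, List.foldl_cons]
      obtain ⟨h1, h2, h3⟩ := pvRow_split k (fun j => line.toList.getD j ' ') (List.range w)
        (List.nodup_range) cnt last (fun j hj => hlast ▸ List.mem_range.mp hj)
      -- name the state after the first row
      set S := (List.range w).foldl (fun (st : List Int × List Nat) (j : Nat) =>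
          if line.toList.getD j ' ' = 'O' then (pvIncr st.1 (st.2.getD j 0), st.2.set j (st.2.getD j 0 + 1))
          else if line.toList.getD j ' ' = '#' then (st.1, st.2.set j (k + 1))
          else st) (cnt, last) with hS
      have hS2len : S.2.length = w := by rw [h2]; exact hlast
      have hIH := ih (k + 1) S.1 S.2 hS2len
      have hpair : (S.1, S.2) = S := rfl
      rw [hpair] at hIH
      rw [hIH, h1]
      refine Eq.trans (PySem.List.foldl_congr_mem _ _ (fun c j =>
        pvAsim ((rest.map (fun line => line.toList.getD j ' ')).zipIdx (k + 1))
          (if line.toList.getD j ' ' = 'O' then last.getD j 0 + 1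
           else if line.toList.getD j ' ' = '#' then k + 1 else last.getD j 0) c) _
        (fun acc j hj => by rw [h3 j, if_pos hj])) ?_
      have hrhs : ∀ (c : List Int) (j : Nat),
          pvAsim (((line :: rest).map (fun line => line.toList.getD j ' ')).zipIdx k) (last.getD j 0) c
          = pvAsim ((rest.map (fun line => line.toList.getD j ' ')).zipIdx (k + 1))
              (if line.toList.getD j ' ' = 'O' then last.getD j 0 + 1
               else if line.toList.getD j ' ' = '#' then k + 1 else last.getD j 0)
              (if line.toList.getD j ' ' = 'O' then pvIncr c (last.getD j 0) else c) := by
        intro c j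
        rw [List.map_cons, List.zipIdx_cons, pvAsim_cons]
      refine Eq.symm (Eq.trans (PySem.List.foldl_congr_mem _ _ (fun c j =>
        pvAsim ((rest.map (fun line => line.toList.getD j ' ')).zipIdx (k + 1))
          (if line.toList.getD j ' ' = 'O' then last.getD j 0 + 1
           else if line.toList.getD j ' ' = '#' then k + 1 else last.getD j 0)
          (if line.toList.getD j ' ' = 'O' then pvIncr c (last.getD j 0) else c)) _
        (fun acc j _ => hrhs acc j)) ?_)
      exact pvFoldl_interchange (List.range w)
        (fun j c => pvAsim ((rest.map (fun line => line.toList.getD j ' ')).zipIdx (k + 1))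
          (if line.toList.getD j ' ' = 'O' then last.getD j 0 + 1
           else if line.toList.getD j ' ' = '#' then k + 1 else last.getD j 0) c)
        (fun j c => if line.toList.getD j ' ' = 'O' then pvIncr c (last.getD j 0) else c)
        (fun j j' c => by
          by_cases hO : line.toList.getD j ' ' = 'O'
          · simp only [hO]
            exact (pvAsim_incr _ _ _ _).symm
          · simp only [hO, if_false]) cnt

-- ===== VERDICT (by name: the statement is the Claim_ definition above) =====
theorem count_rocks_spec : Claim_equal_count_rocks := by
  intro data _ _
  show count_rocks data = count_rocks_alt data
  have hA : count_rocks data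
      = (List.range (((PySem.Str.splitlines data).getD 0 "").toList).length).foldl (fun c j =>
          pvAsim (((PySem.Str.splitlines data).map (fun line => line.toList.getD j ' ')).zipIdx 0)
            ((List.replicate (((PySem.Str.splitlines data).getD 0 "").toList).length 0).getD j 0) c)
          (List.replicate (PySem.Str.splitlines data).length 0) :=
    pvMain (((PySem.Str.splitlines data).getD 0 "").toList).length (PySem.Str.splitlines data) 0
      (List.replicate (PySem.Str.splitlines data).length 0)
      (List.replicate (((PySem.Str.splitlines data).getD 0 "").toList).length 0)
      (List.length_replicate)
  have hB : count_rocks_alt data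
      = (List.range (((PySem.Str.splitlines data).getD 0 "").toList).length).foldl (fun c j =>
          pvAsim (((PySem.Str.splitlines data).map (fun line => line.toList.getD j ' ')).zipIdx 0) 0 c)
          (List.replicate (PySem.Str.splitlines data).length 0) :=
    PySem.List.foldl_congr_mem _ _ _ _ (fun acc j _ =>
      pvB_col (((PySem.Str.splitlines data).map (fun line => line.toList.getD j ' ')).zipIdx 0) acc 0 0)
  rw [hA, hB]
  exact PySem.List.foldl_congr_mem _ _ _ _ (fun acc j _ => by
    have : (List.replicate (((PySem.Str.splitlines data).getD 0 "").toList).length (0 : Nat)).getD j 0 = 0 := by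
      simp only [List.getD_eq_getElem?_getD, List.getElem?_replicate]
      split_ifs <;> rfl
    rw [this])
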